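-- pv_equiv track=rewrite | github.com/tamura70/cspsat-jupyter | cspsat/examples/graph.py | kingGraph
-- ===== SOURCE A (Python) =====
-- def kingGraph(n):
--     vertices = [ (i,j) for i in range(n) for j in range(n) ]
--     edges = []
--     for (i,j) in vertices:
--         for (k,l) in [(i,j+1), (i+1,j-1), (i+1,j), (i+1,j+1)]:
--             if k in range(n) and l in range(n):
--                 edges.append(((i,j), (k,l)))
--     return (vertices, edges)
-- ===== SOURCE B (Python) =====
-- def kingGraph(n):
--     vertices = [(i, j) for i in range(n) for j in range(n)]
--     size = len(vertices)
--     edges = []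
--     for idx, v in enumerate(vertices):
--         for off in sorted({1, n - 1, n, n + 1}):
--             t = idx + off
--             if 0 <= t < size:
--                 w = vertices[t]
--                 if max(abs(v[0] - w[0]), abs(v[1] - w[1])) == 1:
--                     edges.append((v, w))
--     return (vertices, edges)
-- ===== Notes on version B (the rewrite author's own statement) =====
-- stated objective: alternative
-- what changed: Edges are found by flat-index arithmetic on the row-major vertex list: for each vertex position idx the four forward king moves are the fixed index offsets sorted({1, n-1, n, n+1}), and a candidate vertices[idx+off] is kept iff its Chebyshev distance from the source is 1, replacing A's per-vertex coordinate enumeration with bounds checks.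
import Mathlib
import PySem

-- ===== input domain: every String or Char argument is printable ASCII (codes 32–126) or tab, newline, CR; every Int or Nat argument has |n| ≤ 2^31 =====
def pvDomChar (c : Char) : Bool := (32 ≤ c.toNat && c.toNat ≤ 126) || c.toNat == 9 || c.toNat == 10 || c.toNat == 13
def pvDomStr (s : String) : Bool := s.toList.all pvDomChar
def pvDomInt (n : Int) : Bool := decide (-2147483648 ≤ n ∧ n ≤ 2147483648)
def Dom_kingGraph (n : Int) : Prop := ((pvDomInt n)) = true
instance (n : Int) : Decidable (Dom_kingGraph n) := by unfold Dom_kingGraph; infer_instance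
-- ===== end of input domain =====

-- B finds the edges by flat-index offsets sorted({1, n-1, n, n+1}) into the row-major vertex
-- list, filtered by Chebyshev distance 1, instead of A's coordinate neighbour enumeration
-- with bounds checks; objective: alternative algorithm, same cost.


-- ===== PORT A =====
-- the row-major vertex comprehension [(i,j) for i in range(n) for j in range(n)]
def kingGraphVertsA (n : Int) : List (Int × Int) :=
  (PySem.List.pyRange 0 n 1).flatMap fun i =>
    (PySem.List.pyRange 0 n 1).map fun j => (i, j)

-- A's edges loop; 'k in range(n)' is Python's O(1) range-membership test: 0 ≤ k ∧ k < n.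
def kingGraphEdgesA (n : Int) : List ((Int × Int) × (Int × Int)) :=
  (kingGraphVertsA n).foldl (fun edges v =>
    [(v.1, v.2 + 1), (v.1 + 1, v.2 - 1), (v.1 + 1, v.2), (v.1 + 1, v.2 + 1)].foldl
      (fun edges w =>
        if (0 ≤ w.1 ∧ w.1 < n) ∧ (0 ≤ w.2 ∧ w.2 < n) then edges ++ [(v, w)] else edges)
      edges) []

def kingGraph (n : Int) : (List (Int × Int)) × (List ((Int × Int) × (Int × Int))) :=
  (kingGraphVertsA n, kingGraphEdgesA n)

-- ===== PORT B =====
-- the same row-major vertex comprehension (Source B's first line)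
def kingGraphVertsB (n : Int) : List (Int × Int) :=
  (PySem.List.pyRange 0 n 1).flatMap fun i =>
    (PySem.List.pyRange 0 n 1).map fun j => (i, j)

-- sorted({1, n - 1, n, n + 1}): the set literal then sorted (no key)
def kingGraphOffsB (n : Int) : List Int :=
  PySem.List.sorted (PySem.Set.ofList [1, n - 1, n, n + 1]) (fun x => x) false

-- B's edges loop: enumerate, index offsets, '0 <= t < size' is the chained comparison;
-- vertices[t] is PySem.List.pyGet? (its none branch is unreachable: t was checked in range).
def kingGraphEdgesB (n : Int) : List ((Int × Int) × (Int × Int)) :=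
  (PySem.List.enumerate (kingGraphVertsB n) 0).foldl (fun edges p =>
    (kingGraphOffsB n).foldl (fun edges off =>
      if 0 ≤ p.1 + off ∧ p.1 + off < ((kingGraphVertsB n).length : Int) then
        match PySem.List.pyGet? (kingGraphVertsB n) (p.1 + off) with
        | some w => if max |p.2.1 - w.1| |p.2.2 - w.2| = 1 then edges ++ [(p.2, w)] else edges
        | none => edges
      else edges) edges) []

def kingGraph_alt (n : Int) : (List (Int × Int)) × (List ((Int × Int) × (Int × Int))) :=
  (kingGraphVertsB n, kingGraphEdgesB n)

-- ===== PRECONDITION & SPEC =====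
def Spec_kingGraph (n : Int) (out : (List (Int × Int)) × (List ((Int × Int) × (Int × Int)))) : Prop := out = kingGraph_alt n
instance (n : Int) (out : (List (Int × Int)) × (List ((Int × Int) × (Int × Int)))) : Decidable (Spec_kingGraph n out) := by unfold Spec_kingGraph; infer_instance

-- ===== CLAIM (what is proved, stated in full; the proofs are below) =====
def Claim_equal_kingGraph : Prop := ∀ (n : Int), Dom_kingGraph n → Spec_kingGraph n (kingGraph n)

-- ===== LEMMAS AND PROOFS =====

-- vertex k of the row-major board, by flat index
def pvGI (N : Nat) (k : Nat) : Int × Int := ((k / N : Nat), (k % N : Nat))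

-- what A's inner loop appends for one source vertex
def pvCandA (n : Int) (v : Int × Int) : List ((Int × Int) × (Int × Int)) :=
  [(v.1, v.2 + 1), (v.1 + 1, v.2 - 1), (v.1 + 1, v.2), (v.1 + 1, v.2 + 1)].flatMap
    fun w => if (0 ≤ w.1 ∧ w.1 < n) ∧ (0 ≤ w.2 ∧ w.2 < n) then [(v, w)] else []

-- what B's inner loop appends for one (index, source vertex) pair
def pvChunkB (verts : List (Int × Int)) (offs : List Int) (idx : Int) (v : Int × Int) :
    List ((Int × Int) × (Int × Int)) :=
  offs.flatMap fun off =>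
    if 0 ≤ idx + off ∧ idx + off < (verts.length : Int) then
      match PySem.List.pyGet? verts (idx + off) with
      | some w => if max |v.1 - w.1| |v.2 - w.2| = 1 then [(v, w)] else []
      | none => []
    else []

-- an append-chunk foldl is a flatMap
theorem pvFoldlChunks {α β : Type} (l : List α) (f : List β → α → List β) (h : α → List β)
    (hf : ∀ acc x, f acc x = acc ++ h x) (init : List β) :
    l.foldl f init = init ++ l.flatMap h := by
  induction l generalizing init with
  | nil => simp
  | cons a t ih => simp [hf, ih, List.flatMap_cons]

theorem pvEdgesA_eq (n : Int) :
    kingGraphEdgesA n = (kingGraphVertsA n).flatMap (pvCandA n) := by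
  rw [kingGraphEdgesA, pvFoldlChunks _ _ (pvCandA n)]
  · simp
  · intro acc v
    rw [pvCandA, pvFoldlChunks]
    intro acc' w
    split_ifs <;> simp

theorem pvEdgesB_eq (n : Int) :
    kingGraphEdgesB n = (PySem.List.enumerate (kingGraphVertsB n) 0).flatMap
        (fun p => pvChunkB (kingGraphVertsB n) (kingGraphOffsB n) p.1 p.2) := by
  rw [kingGraphEdgesB, pvFoldlChunks _ _ (fun p => pvChunkB (kingGraphVertsB n) (kingGraphOffsB n) p.1 p.2)]
  · simp
  · intro acc p
    rw [pvChunkB, pvFoldlChunks]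
    intro acc' off
    split_ifs with h
    · cases hg : PySem.List.pyGet? (kingGraphVertsB n) (p.1 + off) with
      | none => simp
      | some w => simp only []; split_ifs <;> simp
    · simp

-- row-major double comprehension as a single map over flat indices
theorem pvRangeFlat {β : Type} (m N : Nat) (g : Nat → Nat → β) (hN : 0 < N) :
    (List.range m).flatMap (fun i => (List.range N).map (g i))
      = (List.range (m * N)).map (fun k => g (k / N) (k % N)) := by
  induction m with
  | zero => simp
  | succ m ih =>
    rw [List.range_succ, List.flatMap_append, ih, Nat.succ_mul, List.range_add,
      List.map_append, List.map_map]
    congr 1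
    · simp only [List.flatMap_cons, List.flatMap_nil, List.append_nil]
      refine List.map_congr_left fun j hj => ?_
      rw [List.mem_range] at hj
      have h1 : (m * N + j) / N = m := by
        rw [Nat.mul_comm m N, Nat.mul_add_div hN, Nat.div_eq_of_lt hj, Nat.add_zero]
      have h2 : (m * N + j) % N = j := by
        rw [Nat.mul_comm m N, Nat.mul_add_mod, Nat.mod_eq_of_lt hj]
      rw [Function.comp_apply, h1, h2]

theorem pvVerts_eq (n : Int) :
    kingGraphVertsA n = (List.range (n.toNat * n.toNat)).map (pvGI n.toNat) := by
  by_cases h : n ≤ 0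
  · rw [kingGraphVertsA, PySem.List.pyRange_one_eq_nil h]
    simp [Int.toNat_of_nonpos h]
  · have h : 0 < n := by omega
    have hN : 0 < n.toNat := Int.lt_toNat.mpr h
    rw [kingGraphVertsA, PySem.List.pyRange_one]
    simp only [zero_add, Int.sub_zero, List.flatMap_map, List.map_map, Function.comp_def]
    rw [pvRangeFlat n.toNat n.toNat (fun i j => ((i : Int), (j : Int))) hN]
    rfl

theorem pvEnumerate_map_range {β : Type} (M : Nat) (g : Nat → β) :
    PySem.List.enumerate ((List.range M).map g) 0
      = (List.range M).map (fun k : Nat => ((k : Int), g k)) := by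
  apply List.ext_getElem?
  intro k
  rw [PySem.List.getElem?_enumerate]
  by_cases hk : k < M
  · simp [hk]
  · have h1 : (List.range M)[k]? = none := by
      simp [Nat.le_of_not_lt hk]
    simp [List.getElem?_map, h1]

-- ad-hoc helper: value of pvGI at a decomposed flat index
theorem pvGI_decomp (N a b : Nat) (hb : b < N) : pvGI N (a * N + b) = ((a : Int), (b : Int)) := by
  have hN : 0 < N := by omega
  rw [pvGI]
  have h1 : (a * N + b) / N = a := by
    rw [Nat.mul_comm a N, Nat.mul_add_div hN, Nat.div_eq_of_lt hb, Nat.add_zero]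
  have h2 : (a * N + b) % N = b := by
    rw [Nat.mul_comm a N, Nat.mul_add_mod, Nat.mod_eq_of_lt hb]
  rw [h1, h2]

theorem pvOffs_eq (n : Int) (h : 3 ≤ n) : kingGraphOffsB n = [1, n - 1, n, n + 1] := by
  rw [kingGraphOffsB]
  have hnd : ([1, n - 1, n, n + 1] : List Int).Nodup := by
    simp [List.nodup_cons]
    omega
  rw [show PySem.Set.ofList [1, n - 1, n, n + 1] = [1, n - 1, n, n + 1] from PySem.Set.ofList_eq_self_of_nodup _ hnd]
  apply PySem.List.sorted_eq_self_of_pairwise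
  simp only [List.pairwise_cons, List.mem_cons, List.not_mem_nil, or_false]
  refine ⟨?_, ?_, ?_, by simp⟩ <;> intro b hb <;>
    rcases hb with rfl | rfl | rfl | rfl <;> omega

-- indexing into the row-major vertex list
theorem pvGet_verts (N t : Nat) (ht : t < N * N) :
    PySem.List.pyGet? ((List.range (N * N)).map (pvGI N)) (t : Int) = some (pvGI N t) := by
  rw [PySem.List.pyGet?_natCast]
  simp [ht]

-- one slot of B's inner loop, as a function of the Nat target index
def pvCell (N : Nat) (x y : Int) (t : Nat) : List ((Int × Int) × (Int × Int)) :=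
  if t < N * N then
    (if max |x - (pvGI N t).1| |y - (pvGI N t).2| = 1 then [((x, y), pvGI N t)] else [])
  else []

-- |p - q| of casts, as a cast
theorem pvAbsCast (p q : Nat) (h : p ≤ q) : |(p : Int) - (q : Int)| = ((q - p : Nat) : Int) := by
  rw [abs_sub_comm, abs_of_nonneg (by omega)]
  rw [Nat.cast_sub h]
theorem pvAbsCast' (p q : Nat) (h : q ≤ p) : |(p : Int) - (q : Int)| = ((p - q : Nat) : Int) := by
  rw [abs_of_nonneg (by omega)]
  rw [Nat.cast_sub h]

theorem pvCell_eval (N : Nat) (x y : Int) (t : Nat) :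
    (if 0 ≤ (t : Int) ∧ (t : Int) < ((N * N : Nat) : Int) then
      match PySem.List.pyGet? ((List.range (N * N)).map (pvGI N)) (t : Int) with
      | some w => if max |x - w.1| |y - w.2| = 1 then [((x, y), w)] else []
      | none => ([] : List ((Int × Int) × (Int × Int)))
    else []) = pvCell N x y t := by
  by_cases ht : t < N * N
  · rw [if_pos ⟨Int.natCast_nonneg t, by exact_mod_cast ht⟩, pvGet_verts N t ht, pvCell, if_pos ht]
  · rw [if_neg, pvCell, if_neg ht]
    intro hc
    exact ht (by exact_mod_cast hc.2)

-- the per-vertex inner loops agree (the general case n = N ≥ 3)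
theorem pvPerK (N : Nat) (h3 : 3 ≤ N) (k : Nat) (hk : k < N * N) :
    pvChunkB ((List.range (N * N)).map (pvGI N)) [1, (N : Int) - 1, (N : Int), (N : Int) + 1]
      (k : Int) (pvGI N k)
    = pvCandA (N : Int) (pvGI N k) := by
  have hN : 0 < N := by omega
  obtain ⟨a, b, hb, rfl⟩ : ∃ a b, b < N ∧ k = a * N + b :=
    ⟨k / N, k % N, Nat.mod_lt _ hN, by rw [Nat.mul_comm]; exact (Nat.div_add_mod k N).symm⟩
  have e1 : (a + 1) * N = a * N + N := by ring
  have hN1 : N = (N - 1) + 1 := by omega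
  have e2 : N * N = (N - 1) * N + N := by
    calc N * N = ((N - 1) + 1) * N := by rw [← hN1]
      _ = (N - 1) * N + N := by ring
  have e3 : a * N ≤ (N - 1) * N := Nat.mul_le_mul_right N (by
    rcases Nat.lt_or_ge a N with h | h
    · omega
    · exfalso; have : N * N ≤ a * N := Nat.mul_le_mul_right N h; omega)
  have ha : a < N := by
    rcases Nat.lt_or_ge a N with h | h
    · exact h
    · exfalso; have : N * N ≤ a * N := Nat.mul_le_mul_right N h; omega
  rw [pvGI_decomp N a b hb]
  have hc1 : ((a * N + b : Nat) : Int) + 1 = ((a * N + b + 1 : Nat) : Int) := by push_cast; ring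
  have hc2 : ((a * N + b : Nat) : Int) + ((N : Int) - 1) = ((a * N + b + (N - 1) : Nat) : Int) := by
    push_cast [Nat.cast_sub (by omega : 1 ≤ N)]; ring
  have hc3 : ((a * N + b : Nat) : Int) + (N : Int) = ((a * N + b + N : Nat) : Int) := by push_cast; ring
  have hc4 : ((a * N + b : Nat) : Int) + ((N : Int) + 1) = ((a * N + b + N + 1 : Nat) : Int) := by
    push_cast; ring
  rw [pvChunkB]
  simp only [List.flatMap_cons, List.flatMap_nil, List.append_nil, List.length_map,
    List.length_range, hc1, hc2, hc3, hc4, pvCell_eval]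
  rw [pvCandA]
  simp only [List.flatMap_cons, List.flatMap_nil, List.append_nil]
  refine congrArg₂ _ ?_ (congrArg₂ _ ?_ (congrArg₂ _ ?_ ?_))
  · -- off = 1 : candidate E = (a, b+1)
    by_cases hb1 : b + 1 < N
    · have ht : a * N + (b + 1) < N * N := by omega
      rw [show a * N + b + 1 = a * N + (b + 1) from by omega, pvCell, if_pos ht,
        pvGI_decomp N a (b + 1) hb1]
      rw [if_pos (show max |(a : Int) - ((a : Nat) : Int)| |(b : Int) - ((b + 1 : Nat) : Int)| = 1 from by
        rw [pvAbsCast' a a (Nat.le_refl a), pvAbsCast b (b + 1) (by omega)]; omega)]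
      rw [if_pos (show (0 ≤ (a : Int) ∧ (a : Int) < (N : Int)) ∧ 0 ≤ (b : Int) + 1 ∧ (b : Int) + 1 < (N : Int) from by omega)]
      simp only [List.cons.injEq, Prod.mk.injEq]
      simp
    · rw [if_neg (show ¬ ((0 ≤ (a : Int) ∧ (a : Int) < (N : Int)) ∧ 0 ≤ (b : Int) + 1 ∧ (b : Int) + 1 < (N : Int)) from by omega)]
      by_cases ha1 : a + 1 < N
      · have e4 : (a + 1) * N ≤ (N - 1) * N := Nat.mul_le_mul_right N (by omega)
        have ht : a * N + b + 1 < N * N := by omega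
        rw [pvCell, if_pos ht, show a * N + b + 1 = (a + 1) * N + 0 from by omega,
          pvGI_decomp N (a + 1) 0 (by omega)]
        rw [if_neg (show ¬ (max |(a : Int) - ((a + 1 : Nat) : Int)| |(b : Int) - ((0 : Nat) : Int)| = 1) from by
          rw [pvAbsCast a (a + 1) (by omega), pvAbsCast' b 0 (by omega)]; omega)]
      · have e5 : a * N + b + 1 = N * N := by
          have : (a + 1) * N = N * N := by rw [show a + 1 = N from by omega]
          omega
        rw [pvCell, if_neg (by omega)]
  · -- off = n - 1 : candidate SW = (a+1, b-1)
    by_cases hb0 : 1 ≤ b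
    · by_cases ha1 : a + 1 < N
      · have e4 : (a + 1) * N ≤ (N - 1) * N := Nat.mul_le_mul_right N (by omega)
        have ht : (a + 1) * N + (b - 1) < N * N := by omega
        rw [show a * N + b + (N - 1) = (a + 1) * N + (b - 1) from by omega, pvCell, if_pos ht,
          pvGI_decomp N (a + 1) (b - 1) (by omega)]
        rw [if_pos (show max |(a : Int) - ((a + 1 : Nat) : Int)| |(b : Int) - ((b - 1 : Nat) : Int)| = 1 from by
          rw [pvAbsCast a (a + 1) (by omega), pvAbsCast' b (b - 1) (by omega)]; omega)]
        rw [if_pos (show (0 ≤ (a : Int) + 1 ∧ (a : Int) + 1 < (N : Int)) ∧ 0 ≤ (b : Int) - 1 ∧ (b : Int) - 1 < (N : Int) from by omega)]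
        simp only [List.cons.injEq, Prod.mk.injEq]
        push_cast [Nat.cast_sub (show 1 ≤ b from hb0)]; simp
      · have e5 : (a + 1) * N = N * N := by rw [show a + 1 = N from by omega]
        rw [pvCell, if_neg (by omega),
          if_neg (show ¬ ((0 ≤ (a : Int) + 1 ∧ (a : Int) + 1 < (N : Int)) ∧ 0 ≤ (b : Int) - 1 ∧ (b : Int) - 1 < (N : Int)) from by omega)]
    · have ht : a * N + (N - 1) < N * N := by omega
      rw [show a * N + b + (N - 1) = a * N + (N - 1) from by omega, pvCell, if_pos ht,
        pvGI_decomp N a (N - 1) (by omega)]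
      rw [if_neg (show ¬ (max |(a : Int) - ((a : Nat) : Int)| |(b : Int) - ((N - 1 : Nat) : Int)| = 1) from by
        rw [pvAbsCast' a a (Nat.le_refl a), pvAbsCast b (N - 1) (by omega)]; omega)]
      rw [if_neg (show ¬ ((0 ≤ (a : Int) + 1 ∧ (a : Int) + 1 < (N : Int)) ∧ 0 ≤ (b : Int) - 1 ∧ (b : Int) - 1 < (N : Int)) from by omega)]
  · -- off = n : candidate S = (a+1, b)
    by_cases ha1 : a + 1 < N
    · have e4 : (a + 1) * N ≤ (N - 1) * N := Nat.mul_le_mul_right N (by omega)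
      have ht : (a + 1) * N + b < N * N := by omega
      rw [show a * N + b + N = (a + 1) * N + b from by omega, pvCell, if_pos ht,
        pvGI_decomp N (a + 1) b hb]
      rw [if_pos (show max |(a : Int) - ((a + 1 : Nat) : Int)| |(b : Int) - ((b : Nat) : Int)| = 1 from by
        rw [pvAbsCast a (a + 1) (by omega), pvAbsCast' b b (Nat.le_refl b)]; omega)]
      rw [if_pos (show (0 ≤ (a : Int) + 1 ∧ (a : Int) + 1 < (N : Int)) ∧ 0 ≤ (b : Int) ∧ (b : Int) < (N : Int) from by omega)]
      simp only [List.cons.injEq, Prod.mk.injEq]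
      simp
    · have e5 : (a + 1) * N = N * N := by rw [show a + 1 = N from by omega]
      rw [pvCell, if_neg (by omega),
        if_neg (show ¬ ((0 ≤ (a : Int) + 1 ∧ (a : Int) + 1 < (N : Int)) ∧ 0 ≤ (b : Int) ∧ (b : Int) < (N : Int)) from by omega)]
  · -- off = n + 1 : candidate SE = (a+1, b+1)
    by_cases ha1 : a + 1 < N
    · have e4 : (a + 1) * N ≤ (N - 1) * N := Nat.mul_le_mul_right N (by omega)
      by_cases hb1 : b + 1 < N
      · have ht : (a + 1) * N + (b + 1) < N * N := by omega
        rw [show a * N + b + N + 1 = (a + 1) * N + (b + 1) from by omega, pvCell, if_pos ht,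
          pvGI_decomp N (a + 1) (b + 1) hb1]
        rw [if_pos (show max |(a : Int) - ((a + 1 : Nat) : Int)| |(b : Int) - ((b + 1 : Nat) : Int)| = 1 from by
          rw [pvAbsCast a (a + 1) (by omega), pvAbsCast b (b + 1) (by omega)]; omega)]
        rw [if_pos (show (0 ≤ (a : Int) + 1 ∧ (a : Int) + 1 < (N : Int)) ∧ 0 ≤ (b : Int) + 1 ∧ (b : Int) + 1 < (N : Int) from by omega)]
        simp only [List.cons.injEq, Prod.mk.injEq]
        simp
      · rw [if_neg (show ¬ ((0 ≤ (a : Int) + 1 ∧ (a : Int) + 1 < (N : Int)) ∧ 0 ≤ (b : Int) + 1 ∧ (b : Int) + 1 < (N : Int)) from by omega)]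
        by_cases ha2 : a + 2 < N
        · have e6 : (a + 2) * N ≤ (N - 1) * N := Nat.mul_le_mul_right N (by omega)
          have e7 : (a + 2) * N = a * N + N + N := by ring
          have ht : a * N + b + N + 1 < N * N := by omega
          rw [pvCell, if_pos ht, show a * N + b + N + 1 = (a + 2) * N + 0 from by omega,
            pvGI_decomp N (a + 2) 0 (by omega)]
          rw [if_neg (show ¬ (max |(a : Int) - ((a + 2 : Nat) : Int)| |(b : Int) - ((0 : Nat) : Int)| = 1) from by
            rw [pvAbsCast a (a + 2) (by omega), pvAbsCast' b 0 (by omega)]; omega)]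
        · have e7 : (a + 2) * N = a * N + N + N := by ring
          have e8 : N * N ≤ (a + 2) * N := Nat.mul_le_mul_right N (by omega)
          rw [pvCell, if_neg (by omega)]
    · have e5 : (a + 1) * N = N * N := by rw [show a + 1 = N from by omega]
      rw [pvCell, if_neg (by omega),
        if_neg (show ¬ ((0 ≤ (a : Int) + 1 ∧ (a : Int) + 1 < (N : Int)) ∧ 0 ≤ (b : Int) + 1 ∧ (b : Int) + 1 < (N : Int)) from by omega)]

-- flatMap congruence on members
theorem pvFlatMap_congr_mem {α β : Type} (l : List α) (f g : α → List β)
    (h : ∀ x ∈ l, f x = g x) : l.flatMap f = l.flatMap g := by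
  induction l with
  | nil => rfl
  | cons a t ih =>
    simp only [List.flatMap_cons, h a (by simp), ih fun x hx => h x (by simp [hx])]

theorem pvEdgesMain (n : Int) : kingGraphEdgesA n = kingGraphEdgesB n := by
  by_cases h0 : n ≤ 0
  · have hv : kingGraphVertsA n = [] := by
      rw [pvVerts_eq]; simp [Int.toNat_of_nonpos h0]
    have hv' : kingGraphVertsB n = [] := hv
    rw [kingGraphEdgesA, kingGraphEdgesB, hv, hv']
    rfl
  · obtain ⟨N, rfl⟩ : ∃ N : Nat, n = (N : Int) := ⟨n.toNat, (Int.toNat_of_nonneg (by omega)).symm⟩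
    by_cases h1 : N = 1
    · subst h1; decide
    · by_cases h2 : N = 2
      · subst h2; decide
      · have h3 : 3 ≤ N := by
          have : 0 < N := by exact_mod_cast (by omega : (0 : Int) < (N : Int))
          omega
        rw [pvEdgesA_eq, pvEdgesB_eq]
        have hva : kingGraphVertsA (N : Int) = (List.range (N * N)).map (pvGI N) := by
          rw [pvVerts_eq]; simp
        have hvb : kingGraphVertsB (N : Int) = (List.range (N * N)).map (pvGI N) := hva
        rw [hva, hvb, pvOffs_eq _ (by exact_mod_cast h3), pvEnumerate_map_range,
          List.flatMap_map, List.flatMap_map]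
        refine pvFlatMap_congr_mem _ _ _ fun k hk => ?_
        rw [List.mem_range] at hk
        exact (pvPerK N h3 k hk).symm

theorem pvMain (n : Int) : kingGraph n = kingGraph_alt n := by
  rw [kingGraph, kingGraph_alt, pvEdgesMain]
  rfl

-- ===== VERDICT (by name: the statement is the Claim_ definition above) =====
theorem kingGraph_spec : Claim_equal_kingGraph := by
  intro n _
  exact pvMain n
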